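-- pv_equiv track=rewrite | github.com/sara-zinnat/Natural-Language-Processing-Projects | Sent gen Bi Tri gram.py | biGramTable
-- ===== SOURCE A (Python) =====
-- def biGramTable(corpus):
-- 	bgTable = {}
--
-- 	bgLength = 0
--
-- 	for sent in corpus:
-- 		for i in range(0,len(sent)-1):
-- 			if sent[i] in bgTable:
-- 				if sent[i+1] in bgTable[sent[i]]:
-- 					bgTable[sent[i]][sent[i+1]] += 1
-- 				else:
-- 					bgTable[sent[i]][sent[i+1]] = 1
-- 					bgLength += 1
-- 			else:
-- 				bgTable[sent[i]] = {}
-- 				bgTable[sent[i]][sent[i+1]] = 1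
-- 				bgLength += 1
--
-- 	return bgTable, bgLength
-- ===== SOURCE B (Python) =====
-- def biGramTable(corpus):
-- 	# Two-phase: count every adjacent pair into one flat table, then regroup.
-- 	flat = {}
-- 	for sent in corpus:
-- 		for pair in zip(sent, sent[1:]):
-- 			flat[pair] = flat.get(pair, 0) + 1
--
-- 	bgTable = {}
-- 	for (w1, w2), c in flat.items():
-- 		if w1 in bgTable:
-- 			bgTable[w1][w2] = c
-- 		else:
-- 			bgTable[w1] = {w2: c}
--
-- 	return bgTable, len(flat)
-- ===== Notes on version B (the rewrite author's own statement) =====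
-- stated objective: alternative
-- what changed: B replaces A's inline nested-dict maintenance and incremental distinct-pair counter with a two-phase structure: one pass counts every adjacent pair (from zip(sent, sent[1:]), no index loop) into a single flat table keyed by the pair, then a second pass regroups that flat table into the nested bgTable, with bgLength read off as len(flat).
import Mathlib
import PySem

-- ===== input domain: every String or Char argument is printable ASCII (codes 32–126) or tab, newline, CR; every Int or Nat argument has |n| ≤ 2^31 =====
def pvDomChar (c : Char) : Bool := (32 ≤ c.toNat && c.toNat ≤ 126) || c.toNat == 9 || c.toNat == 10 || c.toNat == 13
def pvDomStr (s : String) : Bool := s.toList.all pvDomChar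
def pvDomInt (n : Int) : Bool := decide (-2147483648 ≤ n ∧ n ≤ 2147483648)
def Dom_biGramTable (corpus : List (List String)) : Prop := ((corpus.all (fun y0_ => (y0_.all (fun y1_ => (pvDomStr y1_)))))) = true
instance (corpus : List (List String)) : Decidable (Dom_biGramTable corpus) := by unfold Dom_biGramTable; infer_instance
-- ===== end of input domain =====

-- B re-implements A as two phases — count each adjacent pair into one flat table, then regroup
-- that table into the nested dict — instead of A's inline nested-dict maintenance ('alternative').

-- ===== PORT A =====
-- one iteration of A's inner loop body, on the current (bgTable, bgLength) state
def biA_step (st : PySem.Dict String (PySem.Dict String Int) × Int) (w1 w2 : String) :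
    PySem.Dict String (PySem.Dict String Int) × Int :=
  let T := st.1
  let n := st.2
  if T.contains w1 then
    let inner := T.getD w1 PySem.Dict.empty
    if inner.contains w2 then
      (T.insert w1 (inner.insert w2 (inner.getD w2 0 + 1)), n)
    else
      (T.insert w1 (inner.insert w2 1), n + 1)
  else
    (T.insert w1 ((PySem.Dict.empty : PySem.Dict String Int).insert w2 1), n + 1)

def biGramTable (corpus : List (List String)) : (List (String × List (String × Int))) × Int :=
  let st := corpus.foldl
    (fun st sent =>
      (PySem.List.pyRange 0 ((sent.length : Int) - 1)).foldl
        (fun st i => biA_step st (PySem.List.pyGetD sent i "") (PySem.List.pyGetD sent (i + 1) ""))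
        st)
    (PySem.Dict.empty, (0 : Int))
  (st.1.items.map (fun p => (p.1, p.2.items)), st.2)

-- ===== PORT B =====
-- one iteration of B's regrouping loop: q = ((w1, w2), c) from the flat table
def biB_group (g : PySem.Dict String (PySem.Dict String Int)) (q : (String × String) × Int) :
    PySem.Dict String (PySem.Dict String Int) :=
  if g.contains q.1.1 then
    g.insert q.1.1 ((g.getD q.1.1 PySem.Dict.empty).insert q.1.2 q.2)
  else
    g.insert q.1.1 ((PySem.Dict.empty : PySem.Dict String Int).insert q.1.2 q.2)

def biGramTable_alt (corpus : List (List String)) : (List (String × List (String × Int))) × Int :=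
  let flat : PySem.Dict (String × String) Int := corpus.foldl
    (fun d sent =>
      (sent.zip (sent.drop 1)).foldl (fun d p => d.insert p (d.getD p 0 + 1)) d)
    PySem.Dict.empty
  let nested := flat.items.foldl biB_group PySem.Dict.empty
  (nested.items.map (fun p => (p.1, p.2.items)), (flat.size : Int))

-- ===== PRECONDITION & SPEC =====
def Spec_biGramTable (corpus : List (List String)) (out : (List (String × List (String × Int))) × Int) : Prop := out = biGramTable_alt corpus
instance (corpus : List (List String)) (out : (List (String × List (String × Int))) × Int) : Decidable (Spec_biGramTable corpus out) := by unfold Spec_biGramTable; infer_instance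

-- ===== CLAIM (what is proved, stated in full; the proofs are below) =====
def Claim_equal_biGramTable : Prop := ∀ (corpus : List (List String)), Dom_biGramTable corpus → Spec_biGramTable corpus (biGramTable corpus)

-- ===== LEMMAS AND PROOFS =====

-- the regrouped table of a flat item list (B's second phase, from the empty dict)
def biG (l : List ((String × String) × Int)) : PySem.Dict String (PySem.Dict String Int) :=
  l.foldl biB_group PySem.Dict.empty

-- B's flat-counting step
def biC (d : PySem.Dict (String × String) Int) (p : String × String) : PySem.Dict (String × String) Int :=
  d.insert p (d.getD p 0 + 1)

theorem biG_append (l : List ((String × String) × Int)) (q : (String × String) × Int) :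
    biG (l ++ [q]) = biB_group (biG l) q := by
  simp [biG, List.foldl_append]

theorem biG_pair_mem (l : List ((String × String) × Int)) (a b : String) (c : Int)
    (hnd : (l.map (·.1)).Nodup) (hmem : ((a, b), c) ∈ l) :
    (biG l).contains a = true ∧ ((biG l).getD a PySem.Dict.empty).get? b = some c := by
  induction l using List.reverseRecOn with
  | nil => simp at hmem
  | append_singleton l q ih =>
    obtain ⟨⟨a', b'⟩, c'⟩ := q
    rw [List.map_append, List.nodup_append] at hnd
    obtain ⟨hnd', -, hdisj⟩ := hnd
    rw [biG_append]
    rcases List.mem_append.mp hmem with h | h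
    · have hne : (a', b') ≠ (a, b) := by
        intro he
        have hm : (a, b) ∈ List.map (fun x => x.1) l := List.mem_map.mpr ⟨((a, b), c), h, rfl⟩
        exact hdisj _ hm _ (by simp) he.symm
      obtain ⟨hca, hgb⟩ := ih hnd' h
      by_cases haa : a' = a
      · subst haa
        have hbb : b' ≠ b := fun he => hne (by simp [he])
        simp only [biB_group, hca, if_true]
        refine ⟨PySem.Dict.contains_insert_self _ _ _, ?_⟩
        rw [PySem.Dict.getD_insert_self, PySem.Dict.get?_insert_of_ne _ _ (Ne.symm hbb)]
        exact hgb
      · simp only [biB_group]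
        split <;>
        · constructor
          · rw [PySem.Dict.contains_insert]; simp [hca]
          · rw [PySem.Dict.getD_insert_of_ne _ _ _ (Ne.symm haa)]; exact hgb
    · simp only [List.mem_singleton, Prod.mk.injEq] at h
      obtain ⟨⟨ha, hb⟩, hc⟩ := h
      subst ha; subst hb; subst hc
      simp only [biB_group]
      split <;>
        exact ⟨PySem.Dict.contains_insert_self _ _ _,
          by rw [PySem.Dict.getD_insert_self, PySem.Dict.get?_insert_self]⟩

theorem biG_not_mem (l : List ((String × String) × Int)) (a b : String)
    (hmem : (a, b) ∉ l.map (·.1)) :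
    ((biG l).getD a PySem.Dict.empty).contains b = false := by
  induction l using List.reverseRecOn with
  | nil => simp [biG, PySem.Dict.getD_empty, PySem.Dict.contains_empty]
  | append_singleton l q ih =>
    obtain ⟨⟨a', b'⟩, c'⟩ := q
    rw [List.map_append, List.mem_append] at hmem
    push Not at hmem
    obtain ⟨h1, h2⟩ := hmem
    have hne : (a', b') ≠ (a, b) := by intro he; exact h2 (by simp [← he])
    rw [biG_append]
    by_cases haa : a' = a
    · subst haa
      have hbb : b' ≠ b := fun he => hne (by simp [he])
      simp only [biB_group]
      split
      · rw [PySem.Dict.getD_insert_self, PySem.Dict.contains_insert]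
        simp [ih h1, Ne.symm hbb]
      · rw [PySem.Dict.getD_insert_self, PySem.Dict.contains_insert]
        simp [PySem.Dict.contains_empty, Ne.symm hbb]
    · simp only [biB_group]
      split <;> rw [PySem.Dict.getD_insert_of_ne _ _ _ (Ne.symm haa)] <;> exact ih h1

theorem insert_comm_of_contains {κ ν : Type} [BEq κ] [LawfulBEq κ] (d : PySem.Dict κ ν)
    (k k' : κ) (v w : ν) (hne : k ≠ k') (hk : d.contains k = true) :
    (d.insert k v).insert k' w = (d.insert k' w).insert k v := by
  apply PySem.Dict.ext
  by_cases hk' : d.contains k' = true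
  · rw [PySem.Dict.items_insert_of_contains _ w (by rw [PySem.Dict.contains_insert]; simp [hk']),
        PySem.Dict.items_insert_of_contains _ v hk,
        PySem.Dict.items_insert_of_contains _ v (by rw [PySem.Dict.contains_insert]; simp [hk]),
        PySem.Dict.items_insert_of_contains _ w hk']
    simp only [List.map_map]
    apply List.map_congr_left
    intro p _
    simp only [Function.comp]
    by_cases h1 : p.1 = k <;> by_cases h2 : p.1 = k' <;>
      simp_all [Ne.symm hne]
  · rw [PySem.Dict.items_insert_of_not_contains _ w (by
        rw [PySem.Dict.contains_insert]; simpa [Ne.symm hne] using hk'),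
        PySem.Dict.items_insert_of_contains _ v hk,
        PySem.Dict.items_insert_of_contains _ v (by rw [PySem.Dict.contains_insert]; simp [hk]),
        PySem.Dict.items_insert_of_not_contains _ w (by simpa using hk')]
    rw [List.map_append]
    simp [Ne.symm hne]

theorem biG_overwrite (l : List ((String × String) × Int)) (a b : String) (v : Int)
    (hnd : (l.map (·.1)).Nodup) (hmem : (a, b) ∈ l.map (·.1)) :
    biG (l.map (fun q => if q.1 == (a, b) then ((a, b), v) else q)) =
      (biG l).insert a (((biG l).getD a PySem.Dict.empty).insert b v) := by
  induction l using List.reverseRecOn with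
  | nil => simp at hmem
  | append_singleton l q ih =>
    obtain ⟨⟨a', b'⟩, c'⟩ := q
    have hnd' : (l.map (·.1)).Nodup := by
      rw [List.map_append, List.nodup_append] at hnd; exact hnd.1
    have hfresh : ((a', b') : String × String) ∉ l.map (·.1) := by
      rw [List.map_append, List.nodup_append] at hnd
      intro hm
      exact hnd.2.2 _ hm _ (by simp) rfl
    rw [List.map_append]
    by_cases hq : ((a', b') : String × String) = (a, b)
    · -- the overwritten pair is the final element: the prefix maps to itself
      have hmap : l.map (fun q => if q.1 == (a, b) then ((a, b), v) else q) = l := by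
        conv_rhs => rw [← List.map_id l]
        apply List.map_congr_left
        intro x hx
        have hxne : x.1 ≠ (a, b) := by
          intro he
          exact hfresh (hq ▸ he ▸ List.mem_map.mpr ⟨x, hx, rfl⟩)
        simp [hxne]
      obtain ⟨ha, hb⟩ := Prod.mk.injEq .. ▸ hq
      subst ha; subst hb
      rw [hmap]
      simp only [List.map_cons, List.map_nil, beq_self_eq_true, if_true]
      rw [biG_append, biG_append]
      by_cases hca : (biG l).contains a' = true
      · simp only [biB_group, hca, if_true, PySem.Dict.getD_insert_self,
          PySem.Dict.insert_insert_self]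
      · simp only [biB_group, hca, if_false, Bool.false_eq_true,
          PySem.Dict.getD_insert_self, PySem.Dict.insert_insert_self]
    · -- the overwritten pair lies in the prefix; the final element is untouched
      have hmem' : ((a, b) : String × String) ∈ l.map (·.1) := by
        have hmem2 := hmem
        rw [List.map_append, List.mem_append] at hmem2
        rcases hmem2 with h | h
        · exact h
        · simp only [List.map_cons, List.map_nil, List.mem_singleton] at h
          exact absurd h.symm hq
      obtain ⟨x, hx, hx1⟩ := List.mem_map.mp hmem'
      obtain ⟨hpm, hgb⟩ := biG_pair_mem l a b x.2 hnd'
        (by rw [← hx1]; simpa using hx)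
      have hIb : ((biG l).getD a PySem.Dict.empty).contains b = true := by
        rw [PySem.Dict.contains_eq_isSome_get?, hgb]; rfl
      have hqmap : (fun q => if q.1 == (a, b) then ((a, b), v) else q) ((a', b'), c') = ((a', b'), c') := by
        simp [hq]
      simp only [List.map_cons, List.map_nil, hqmap]
      rw [biG_append, biG_append, ih hnd' hmem']
      by_cases haa : a' = a
      · subst haa
        have hbb : b' ≠ b := fun he => hq (by simp [he])
        simp only [biB_group, PySem.Dict.contains_insert_self, if_true, hpm,
          PySem.Dict.getD_insert_self, PySem.Dict.insert_insert_self]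
        rw [insert_comm_of_contains _ b b' v c' (Ne.symm hbb) hIb]
      · have hc1 : ((biG l).insert a (((biG l).getD a PySem.Dict.empty).insert b v)).contains a'
            = (biG l).contains a' := by
          rw [PySem.Dict.contains_insert]; simp [haa]
        have hg1 : ((biG l).insert a (((biG l).getD a PySem.Dict.empty).insert b v)).getD a' PySem.Dict.empty
            = (biG l).getD a' PySem.Dict.empty :=
          PySem.Dict.getD_insert_of_ne _ _ _ haa
        by_cases hca' : (biG l).contains a' = true
        · simp only [biB_group, hc1, hca', if_true, hg1]
          rw [PySem.Dict.getD_insert_of_ne _ _ _ (Ne.symm haa),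
            insert_comm_of_contains _ a a' _ _ (Ne.symm haa) hpm]
        · simp only [biB_group, hc1, hca', if_false, Bool.false_eq_true, hg1]
          rw [PySem.Dict.getD_insert_of_ne _ _ _ (Ne.symm haa),
            insert_comm_of_contains _ a a' _ _ (Ne.symm haa) hpm]

theorem biA_step_eq (f : PySem.Dict (String × String) Int) (a b : String)
    (hnd : f.keys.Nodup) :
    biA_step (biG f.items, (f.size : Int)) a b = (biG (biC f (a, b)).items, ((biC f (a, b)).size : Int)) := by
  have hndl : (f.items.map (·.1)).Nodup := hnd
  by_cases hc : f.contains (a, b) = true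
  · -- existing pair: counting overwrites the flat value; A increments the inner value
    obtain ⟨v, hv⟩ : ∃ v, f.get? (a, b) = some v := by
      rw [PySem.Dict.contains_eq_isSome_get?] at hc
      exact Option.isSome_iff_exists.mp hc
    have hvm : ((a, b), v) ∈ f.items := PySem.Dict.mem_items_of_get?_eq_some _ hv
    obtain ⟨hca, hgb⟩ := biG_pair_mem f.items a b v hndl hvm
    have hIb : ((biG f.items).getD a PySem.Dict.empty).contains b = true := by
      rw [PySem.Dict.contains_eq_isSome_get?, hgb]; rfl
    have hIv : ((biG f.items).getD a PySem.Dict.empty).getD b 0 = v :=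
      PySem.Dict.getD_of_get?_eq_some _ _ hgb
    have hfd : f.getD (a, b) 0 = v := PySem.Dict.getD_of_get?_eq_some _ _ hv
    have hitems : (biC f (a, b)).items
        = f.items.map (fun q => if q.1 == (a, b) then ((a, b), v + 1) else q) := by
      rw [biC, hfd, PySem.Dict.items_insert_of_contains _ _ hc]
    have hmemk : ((a, b) : String × String) ∈ f.items.map (·.1) :=
      List.mem_map.mpr ⟨((a, b), v), hvm, rfl⟩
    simp only [biA_step, hca, if_true, hIb, hIv]
    rw [hitems, biG_overwrite f.items a b (v + 1) hndl hmemk]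
    have hsz : (biC f (a, b)).size = f.size := by
      rw [biC, PySem.Dict.size_insert]; simp [hc]
    rw [hsz]
  · -- fresh pair: counting appends ((a,b),1); A adds a fresh inner entry and bumps the length
    have hnm : ((a, b) : String × String) ∉ f.items.map (·.1) := by
      intro hm
      exact hc (PySem.Dict.contains_iff_mem_keys f (a, b) |>.mpr hm)
    have hIb : ((biG f.items).getD a PySem.Dict.empty).contains b = false :=
      biG_not_mem f.items a b hnm
    have hitems : (biC f (a, b)).items = f.items ++ [((a, b), 1)] := by
      rw [biC, PySem.Dict.getD_of_not_contains _ _ (by simpa using hc),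
        PySem.Dict.items_insert_of_not_contains _ _ (by simpa using hc)]
      norm_num
    have hsz : (biC f (a, b)).size = f.size + 1 := by
      rw [biC, PySem.Dict.size_insert]; simp [hc]
    rw [hitems, biG_append, hsz]
    by_cases hca : (biG f.items).contains a = true
    · simp only [biA_step, biB_group, hca, if_true, hIb, if_false, Bool.false_eq_true]
      push_cast; ring_nf
    · simp only [biA_step, biB_group, hca, if_false, Bool.false_eq_true]
      push_cast; ring_nf

theorem biC_keys_nodup (f : PySem.Dict (String × String) Int) (p : String × String)
    (hnd : f.keys.Nodup) : (biC f p).keys.Nodup :=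
  PySem.Dict.nodup_keys_insert _ _ _ hnd

theorem biA_fold_eq (ps : List (String × String)) (f : PySem.Dict (String × String) Int)
    (hnd : f.keys.Nodup) :
    ps.foldl (fun st p => biA_step st p.1 p.2) (biG f.items, (f.size : Int)) =
      (biG (ps.foldl biC f).items, ((ps.foldl biC f).size : Int)) := by
  induction ps generalizing f with
  | nil => rfl
  | cons p ps ih =>
    simp only [List.foldl_cons]
    rw [show biA_step (biG f.items, (f.size : Int)) p.1 p.2
          = (biG (biC f p).items, ((biC f p).size : Int)) from biA_step_eq f p.1 p.2 hnd]
    exact ih (biC f p) (biC_keys_nodup f p hnd)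

theorem pairs_eq (sent : List String) :
    (PySem.List.pyRange 0 ((sent.length : Int) - 1)).map
        (fun i => (PySem.List.pyGetD sent i "", PySem.List.pyGetD sent (i + 1) "")) =
      sent.zip (sent.drop 1) := by
  cases sent with
  | nil => decide
  | cons x xs =>
    have hlen : ((x :: xs).length : Int) - 1 = (xs.length : Nat) := by
      simp
    rw [hlen, PySem.List.pyRange_zero_natCast, List.map_map]
    apply List.ext_getElem
    · simp
    · intro i h1 h2
      simp only [List.getElem_map, List.getElem_range, Function.comp, List.getElem_zip]
      have hi : i < xs.length := by simpa using h2
      have e1 : PySem.List.pyGetD (x :: xs) (i : Int) "" = (x :: xs)[i] := by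
        rw [PySem.List.pyGetD_eq_getElem _ _ (by positivity) (by simp; omega)]
        simp
      have e2 : PySem.List.pyGetD (x :: xs) ((i : Int) + 1) "" = (x :: xs)[i + 1] := by
        rw [show ((i : Int) + 1) = ((i + 1 : Nat) : Int) by push_cast; ring,
          PySem.List.pyGetD_eq_getElem _ _ (by positivity) (by simp; omega)]
        simp
      rw [e1, e2]
      simp

theorem biC_fold_nodup (ps : List (String × String)) (f : PySem.Dict (String × String) Int)
    (hnd : f.keys.Nodup) : (ps.foldl biC f).keys.Nodup := by
  induction ps generalizing f with
  | nil => exact hnd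
  | cons p ps ih => exact ih _ (biC_keys_nodup f p hnd)

theorem sent_fold_eq (st : PySem.Dict String (PySem.Dict String Int) × Int) (sent : List String) :
    (PySem.List.pyRange 0 ((sent.length : Int) - 1)).foldl
        (fun st i => biA_step st (PySem.List.pyGetD sent i "") (PySem.List.pyGetD sent (i + 1) ""))
        st
      = (sent.zip (sent.drop 1)).foldl (fun st p => biA_step st p.1 p.2) st := by
  rw [← pairs_eq sent, List.foldl_map]

theorem corpus_fold_eq (corpus : List (List String)) (f : PySem.Dict (String × String) Int)
    (hnd : f.keys.Nodup) :
    corpus.foldl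
        (fun st sent =>
          (PySem.List.pyRange 0 ((sent.length : Int) - 1)).foldl
            (fun st i => biA_step st (PySem.List.pyGetD sent i "") (PySem.List.pyGetD sent (i + 1) ""))
            st)
        (biG f.items, (f.size : Int))
      = (biG ((corpus.foldl (fun d sent =>
            (sent.zip (sent.drop 1)).foldl (fun d p => d.insert p (d.getD p 0 + 1)) d) f)).items,
          ((corpus.foldl (fun d sent =>
            (sent.zip (sent.drop 1)).foldl (fun d p => d.insert p (d.getD p 0 + 1)) d) f).size : Int)) := by
  induction corpus generalizing f with
  | nil => rfl
  | cons sent rest ih =>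
    simp only [List.foldl_cons]
    rw [sent_fold_eq, biA_fold_eq (sent.zip (sent.drop 1)) f hnd]
    exact ih _ (biC_fold_nodup (sent.zip (sent.drop 1)) f hnd)

-- ===== VERDICT (by name: the statement is the Claim_ definition above) =====
theorem biGramTable_spec : Claim_equal_biGramTable := by
  intro corpus _
  unfold Spec_biGramTable biGramTable biGramTable_alt
  rw [show ((PySem.Dict.empty, (0 : Int)) : PySem.Dict String (PySem.Dict String Int) × Int)
        = (biG (PySem.Dict.empty : PySem.Dict (String × String) Int).items,
            ((PySem.Dict.empty : PySem.Dict (String × String) Int).size : Int)) from rfl,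
      corpus_fold_eq corpus PySem.Dict.empty (by exact PySem.Dict.nodup_keys_empty)]
  rfl
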